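-- pv_equiv track=rewrite | github.com/kulkarniadithya/CCCE | code/pre-processing/convert_to_index.py | get_index_sequence
-- ===== SOURCE A (Python) =====
-- def get_index_sequence(indexes):
--     updated_indexes = []
--     for i in range(0, len(indexes)):
--         if indexes[i] not in updated_indexes:
--             updated_indexes.append(indexes[i])
--     final_indexes = []
--     if len(updated_indexes) > 1:
--         for i in range(0, len(updated_indexes)):
--             if i == 0:
--                 diff = updated_indexes[i + 1] - updated_indexes[i]
--                 if diff < 2:
--                     final_indexes.append(updated_indexes[i])
--             elif (i > 0) and (i < len(updated_indexes) - 1):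
--                 diff1 = updated_indexes[i + 1] - updated_indexes[i]
--                 diff2 = updated_indexes[i] - updated_indexes[i - 1]
--                 if diff1 < 2 or diff2 < 2:
--                     final_indexes.append(updated_indexes[i])
--             else:
--                 diff2 = updated_indexes[i] - updated_indexes[i - 1]
--                 if diff2 < 2:
--                     final_indexes.append(updated_indexes[i])
--         return final_indexes
--     else:
--         return updated_indexes
-- ===== SOURCE B (Python) =====
-- def get_index_sequence(indexes):
--     # different decomposition: dedup via dict.fromkeys, then segment into maximal
--     # runs of near-adjacent (gap < 2) elements and emit only runs of length >= 2
--     updated = list(dict.fromkeys(indexes))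
--     if len(updated) <= 1:
--         return updated
--     out = []
--     run = [updated[0]]
--     for x in updated[1:]:
--         if x - run[-1] < 2:
--             run.append(x)
--         else:
--             if len(run) > 1:
--                 out.extend(run)
--             run = [x]
--     if len(run) > 1:
--         out.extend(run)
--     return out
-- ===== Notes on version B (the rewrite author's own statement) =====
-- stated objective: faster
-- what changed: B dedups with dict.fromkeys instead of A's list-membership scan, then instead of A's index-based first/middle/last three-branch neighbour test it segments the deduped list into maximal runs of consecutive gap < 2 and emits only the runs of length >= 2.
import Mathlib
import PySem

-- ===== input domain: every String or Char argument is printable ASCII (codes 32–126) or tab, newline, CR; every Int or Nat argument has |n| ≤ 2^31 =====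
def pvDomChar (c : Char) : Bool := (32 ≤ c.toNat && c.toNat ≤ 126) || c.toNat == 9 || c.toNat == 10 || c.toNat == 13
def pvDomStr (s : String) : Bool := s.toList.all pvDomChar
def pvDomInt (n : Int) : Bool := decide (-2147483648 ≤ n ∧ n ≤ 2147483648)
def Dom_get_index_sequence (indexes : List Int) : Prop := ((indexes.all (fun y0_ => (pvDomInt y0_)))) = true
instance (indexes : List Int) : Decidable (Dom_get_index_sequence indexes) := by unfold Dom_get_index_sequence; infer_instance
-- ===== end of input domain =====

-- B replaces A's index-based three-branch neighbour filter by a run-segmentation pass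
-- (emit maximal gap<2 runs of length >= 2) over a dict.fromkeys ordered dedup (objective: alternative decomposition; dedup is asymptotically faster).


-- ===== PORT A =====
def get_index_sequence (indexes : List Int) : List Int :=
  let updated :=
    (PySem.List.pyRange 0 (indexes.length : Int) 1).foldl
      (fun acc i =>
        if PySem.List.pyGetD indexes i 0 ∈ acc then acc
        else acc ++ [PySem.List.pyGetD indexes i 0]) []
  if updated.length > 1 then
    (PySem.List.pyRange 0 (updated.length : Int) 1).foldl
      (fun acc i =>
        if i = 0 then
          if PySem.List.pyGetD updated (i + 1) 0 - PySem.List.pyGetD updated i 0 < 2 then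
            acc ++ [PySem.List.pyGetD updated i 0]
          else acc
        else if 0 < i ∧ i < (updated.length : Int) - 1 then
          if PySem.List.pyGetD updated (i + 1) 0 - PySem.List.pyGetD updated i 0 < 2 ∨
             PySem.List.pyGetD updated i 0 - PySem.List.pyGetD updated (i - 1) 0 < 2 then
            acc ++ [PySem.List.pyGetD updated i 0]
          else acc
        else
          if PySem.List.pyGetD updated i 0 - PySem.List.pyGetD updated (i - 1) 0 < 2 then
            acc ++ [PySem.List.pyGetD updated i 0]
          else acc) []
  else updated

-- ===== PORT B =====
def get_index_sequence_alt (indexes : List Int) : List Int :=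
  let updated := PySem.List.dedup indexes
  if updated.length ≤ 1 then updated
  else
    let p :=
      (PySem.List.slice updated (some 1) none).foldl
        (fun (p : List Int × List Int) x =>
          if x - PySem.List.pyGetD p.2 (-1) 0 < 2 then (p.1, p.2 ++ [x])
          else ((if 1 < p.2.length then p.1 ++ p.2 else p.1), [x]))
        ([], [PySem.List.pyGetD updated 0 0])
    if 1 < p.2.length then p.1 ++ p.2 else p.1

-- ===== PRECONDITION & SPEC =====
def Spec_get_index_sequence (indexes : List Int) (out : List Int) : Prop := out = get_index_sequence_alt indexes
instance (indexes : List Int) (out : List Int) : Decidable (Spec_get_index_sequence indexes out) := by unfold Spec_get_index_sequence; infer_instance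

-- ===== CLAIM (what is proved, stated in full; the proofs are below) =====
def Claim_equal_get_index_sequence : Prop := ∀ (indexes : List Int), Dom_get_index_sequence indexes → Spec_get_index_sequence indexes (get_index_sequence indexes)

-- ===== LEMMAS AND PROOFS =====

-- proof-only helper: the element-wise "keep" recursion both loops compute;
-- pc = "a previous element exists at gap < 2".
def specRun : Bool → List Int → List Int
  | _,  [] => []
  | pc, [x] => if pc then [x] else []
  | pc, x :: y :: t =>
      (if pc || decide (y - x < 2) then [x] else []) ++ specRun (decide (y - x < 2)) (y :: t)

def pk (pc : Bool) (u : List Int) (k : Nat) : Bool :=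
  (if k = 0 then pc else decide (u.getD k 0 - u.getD (k - 1) 0 < 2)) ||
  (decide (k + 1 < u.length) && decide (u.getD (k + 1) 0 - u.getD k 0 < 2))

lemma dedupA (xs : List Int) :
    xs.foldl (fun acc x => if x ∈ acc then acc else acc ++ [x]) [] = PySem.List.dedup xs := by
  rw [PySem.List.dedup_eq_ofList, PySem.Set.ofList_eq_foldl]
  exact PySem.List.foldl_congr_mem xs _ _ [] (fun acc x _ => (PySem.Set.add_eq_ite acc x).symm)

lemma pk_shift (pc : Bool) (x : Int) (v : List Int) (k : Nat) :
    pk pc (x :: v) (k + 1) = pk (decide (v.getD 0 0 - x < 2)) v k := by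
  rcases k with _ | k <;> simp [pk] <;> rfl

lemma pk_to_spec (u : List Int) (pc : Bool) :
    ((List.range u.length).filter (pk pc u)).map (fun k => u.getD k 0) = specRun pc u := by
  induction u generalizing pc with
  | nil => simp [specRun]
  | cons x v ih =>
    have hrange : List.range (x :: v).length = 0 :: (List.range v.length).map (· + 1) := by
      simpa [Nat.succ_eq_add_one] using (List.range_succ_eq_map (n := v.length))
    rw [hrange, List.filter_cons]
    have key : ((List.map (· + 1) (List.range v.length)).filter (pk pc (x :: v))).map
        (fun k => (x :: v).getD k 0) = specRun (decide (v.getD 0 0 - x < 2)) v := by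
      rw [List.filter_map, List.map_map]
      simp only [Function.comp_def]
      rw [List.filter_congr (fun k _ => pk_shift pc x v k)]
      have hm : (fun k => (x :: v).getD (k + 1) 0) = fun k => v.getD k 0 := by
        funext k; simp
      rw [hm]
      exact ih _
    cases v with
    | nil =>
      simp only [List.length_nil, List.range_zero, List.map_nil, List.filter_nil]
      cases pc <;> simp [pk, specRun]
    | cons y t =>
      have hpk0 : pk pc (x :: y :: t) 0 = (pc || decide (y - x < 2)) := by
        simp [pk]
      by_cases h0 : (pc || decide (y - x < 2)) = true
      · rw [hpk0, if_pos h0, List.map_cons]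
        have : (x :: y :: t).getD 0 0 = x := rfl
        rw [this, key]
        simp only [specRun, h0, if_pos rfl, List.getD_cons_zero]
        simp
      · rw [hpk0, if_neg h0, key]
        simp only [specRun, List.getD_cons_zero]
        rw [if_neg h0]
        simp

lemma phaseA (u : List Int) (h1 : 1 < u.length) :
    (PySem.List.pyRange 0 (u.length : Int) 1).foldl
      (fun acc i =>
        if i = 0 then
          if PySem.List.pyGetD u (i + 1) 0 - PySem.List.pyGetD u i 0 < 2 then
            acc ++ [PySem.List.pyGetD u i 0]
          else acc
        else if 0 < i ∧ i < (u.length : Int) - 1 then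
          if PySem.List.pyGetD u (i + 1) 0 - PySem.List.pyGetD u i 0 < 2 ∨
             PySem.List.pyGetD u i 0 - PySem.List.pyGetD u (i - 1) 0 < 2 then
            acc ++ [PySem.List.pyGetD u i 0]
          else acc
        else
          if PySem.List.pyGetD u i 0 - PySem.List.pyGetD u (i - 1) 0 < 2 then
            acc ++ [PySem.List.pyGetD u i 0]
          else acc) [] = specRun false u := by
  set n : Int := (u.length : Int) with hn
  have hbody := PySem.List.foldl_congr_mem (PySem.List.pyRange 0 n 1)
    (fun acc i =>
        if i = 0 then
          if PySem.List.pyGetD u (i + 1) 0 - PySem.List.pyGetD u i 0 < 2 then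
            acc ++ [PySem.List.pyGetD u i 0]
          else acc
        else if 0 < i ∧ i < n - 1 then
          if PySem.List.pyGetD u (i + 1) 0 - PySem.List.pyGetD u i 0 < 2 ∨
             PySem.List.pyGetD u i 0 - PySem.List.pyGetD u (i - 1) 0 < 2 then
            acc ++ [PySem.List.pyGetD u i 0]
          else acc
        else
          if PySem.List.pyGetD u i 0 - PySem.List.pyGetD u (i - 1) 0 < 2 then
            acc ++ [PySem.List.pyGetD u i 0]
          else acc)
    (fun acc i =>
        if (if i = 0 then
              decide (PySem.List.pyGetD u (i + 1) 0 - PySem.List.pyGetD u i 0 < 2)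
            else if 0 < i ∧ i < n - 1 then
              decide (PySem.List.pyGetD u (i + 1) 0 - PySem.List.pyGetD u i 0 < 2 ∨
                      PySem.List.pyGetD u i 0 - PySem.List.pyGetD u (i - 1) 0 < 2)
            else
              decide (PySem.List.pyGetD u i 0 - PySem.List.pyGetD u (i - 1) 0 < 2)) = true then
          acc ++ [PySem.List.pyGetD u i 0]
        else acc)
    []
    (by
      intro acc i _
      by_cases h0 : i = 0 <;> by_cases hm : 0 < i ∧ i < n - 1 <;>
        simp only [h0, hm, if_true, if_false, decide_eq_true_eq] <;>
        split_ifs <;> simp_all <;> omega)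
  rw [hbody, PySem.List.foldl_append_if
      (fun i : Int =>
        if i = 0 then
          decide (PySem.List.pyGetD u (i + 1) 0 - PySem.List.pyGetD u i 0 < 2)
        else if 0 < i ∧ i < n - 1 then
          decide (PySem.List.pyGetD u (i + 1) 0 - PySem.List.pyGetD u i 0 < 2 ∨
                  PySem.List.pyGetD u i 0 - PySem.List.pyGetD u (i - 1) 0 < 2)
        else
          decide (PySem.List.pyGetD u i 0 - PySem.List.pyGetD u (i - 1) 0 < 2))
      (fun i => PySem.List.pyGetD u i 0) (PySem.List.pyRange 0 n 1) []]
  simp only [List.nil_append]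
  rw [PySem.List.pyRange_one 0 n]
  have hnn : (n - 0).toNat = u.length := by omega
  rw [hnn, List.filter_map, List.map_map]
  simp only [Function.comp_def]
  rw [← pk_to_spec u false]
  have hfc : ∀ k ∈ List.range u.length,
      (if ((0 : Int) + k) = 0 then
          decide (PySem.List.pyGetD u ((0 + (k : Int)) + 1) 0 - PySem.List.pyGetD u (0 + (k : Int)) 0 < 2)
        else if 0 < (0 : Int) + (k : Int) ∧ (0 : Int) + (k : Int) < n - 1 then
          decide (PySem.List.pyGetD u ((0 + (k : Int)) + 1) 0 - PySem.List.pyGetD u (0 + (k : Int)) 0 < 2 ∨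
                  PySem.List.pyGetD u (0 + (k : Int)) 0 - PySem.List.pyGetD u ((0 + (k : Int)) - 1) 0 < 2)
        else
          decide (PySem.List.pyGetD u (0 + (k : Int)) 0 - PySem.List.pyGetD u ((0 + (k : Int)) - 1) 0 < 2))
        = pk false u k := by
    intro k hk
    rw [List.mem_range] at hk
    have e1 : ((0 : Int) + (k : Int)) + 1 = ((k + 1 : Nat) : Int) := by push_cast; ring
    have e0 : ((0 : Int) + (k : Int)) = ((k : Nat) : Int) := by push_cast; ring
    rcases Nat.eq_zero_or_pos k with rfl | hkpos
    · have hz : ((0 : Int) + ((0 : Nat) : Int)) = 0 := by norm_num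
      rw [if_pos hz,
          show (0:ℤ) + ((0:ℕ):ℤ) + 1 = ((1:ℕ):ℤ) by norm_num,
          show (0:ℤ) + ((0:ℕ):ℤ) = ((0:ℕ):ℤ) by norm_num,
          PySem.List.pyGetD_natCast, PySem.List.pyGetD_natCast]
      have hlt : decide (0 + 1 < u.length) = true := by simpa using h1
      simp only [pk, if_pos rfl, hlt, Bool.true_and, Bool.false_or]
      norm_num
    · have hne : ¬ ((0 : Int) + (k : Int)) = 0 := by push_cast; omega
      rw [if_neg hne]
      have em1 : ((0 : Int) + (k : Int)) - 1 = ((k - 1 : Nat) : Int) := by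
        push_cast [Nat.cast_sub hkpos]; ring
      have hk0 : k ≠ 0 := by omega
      have e1' : ((k : Int) + 1) = ((k + 1 : Nat) : Int) := by push_cast; ring
      have em1' : ((k : Int) - 1) = ((k - 1 : Nat) : Int) := by
        push_cast [Nat.cast_sub hkpos]; ring
      by_cases hmid : k + 1 < u.length
      · have hcond : 0 < (0 : Int) + (k : Int) ∧ (0 : Int) + (k : Int) < n - 1 := by
          constructor <;> (push_cast; omega)
        rw [if_pos hcond]
        simp only [pk, hk0, if_neg hk0, hmid, e0, e1', em1', PySem.List.pyGetD_natCast,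
          decide_true, Bool.true_and]
        rw [Bool.decide_or, Bool.or_comm]
        simp
      · have hcond : ¬ (0 < (0 : Int) + (k : Int) ∧ (0 : Int) + (k : Int) < n - 1) := by
          push_cast; omega
        rw [if_neg hcond]
        simp only [pk, if_neg hk0, hmid, decide_false, Bool.false_and, Bool.or_false, e0, e1', em1', PySem.List.pyGetD_natCast]
  rw [List.filter_congr hfc]
  apply List.map_congr_left
  intro k hk
  have e0 : ((0 : Int) + (k : Int)) = ((k : Nat) : Int) := by push_cast; ring
  simp [e0, PySem.List.pyGetD_natCast]

lemma bfold (rest : List Int) : ∀ (out ys : List Int) (g : Int),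
    (let p := rest.foldl
        (fun (p : List Int × List Int) x =>
          if x - PySem.List.pyGetD p.2 (-1) 0 < 2 then (p.1, p.2 ++ [x])
          else ((if 1 < p.2.length then p.1 ++ p.2 else p.1), [x])) (out, ys ++ [g]);
     if 1 < p.2.length then p.1 ++ p.2 else p.1)
    = out ++ ys ++ specRun (decide (0 < ys.length)) (g :: rest) := by
  induction rest with
  | nil =>
    intro out ys g
    rcases ys with _ | ⟨a, t⟩ <;> simp [specRun]
  | cons x rest ih =>
    intro out ys g
    simp only [List.foldl_cons, PySem.List.pyGetD_neg_one_append_singleton]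
    by_cases hx : x - g < 2
    · rw [if_pos hx]
      have hih := ih out (ys ++ [g]) x
      simp only at hih
      rw [hih]
      have hx2 : x ≤ 1 + g := by omega
      conv_rhs => rw [specRun]
      simp [hx2, specRun, List.append_assoc]
    · rw [if_neg hx]
      have hih := ih (if 1 < (ys ++ [g]).length then out ++ (ys ++ [g]) else out) [] x
      simp only [List.nil_append] at hih
      rw [hih]
      have hx2 : ¬ (x ≤ 1 + g) := by omega
      conv_rhs => rw [specRun]
      rcases ys with _ | ⟨a, t⟩ <;> simp [hx2, specRun, List.append_assoc]


-- ===== VERDICT (by name: the statement is the Claim_ definition above) =====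
theorem get_index_sequence_spec : Claim_equal_get_index_sequence := by
  intro indexes _
  unfold Spec_get_index_sequence get_index_sequence get_index_sequence_alt
  dsimp only
  rw [PySem.List.foldl_pyRange_zero_pyGetD' indexes 0
        (fun acc x => if x ∈ acc then acc else acc ++ [x]) []]
  rw [dedupA]
  generalize PySem.List.dedup indexes = u
  by_cases h1 : 1 < u.length
  · rw [if_pos (by omega), if_neg (by omega)]
    rw [phaseA u h1]
    cases u with
    | nil => simp at h1
    | cons a t =>
      rw [PySem.List.slice_from_one]
      simp only [List.tail_cons, PySem.List.pyGetD_zero_cons]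
      have hb := bfold t [] [] a
      simp only [List.nil_append, List.length_nil] at hb
      rw [hb]
      simp
  · rw [if_neg (by omega), if_pos (by omega)]
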